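-- pv_equiv track=rewrite | github.com/mjjunng/repo | programmers/dragonappear/week1/디펜스 게임.py | solution
-- ===== SOURCE A (Python) =====
-- from collections import deque
-- import heapq as hq
--
-- def solution(n,k,enemy):
--
--     # 예외처리
--     if n > sum(enemy):
--         return len(enemy)
--
--     answer = 0
--     enemies = deque(enemy)
--     heapq = []
--
--     # 게임 진행
--     while n>=0 and enemies:
--         enemy_number = enemies.popleft()
--         n -= enemy_number
--         hq.heappush(heapq,-enemy_number) # 적수 카운팅 -> 최대힙 구성
--
--         if n>=0: answer+=1
--         elif k>0: # 게임에서 질 경우, 진행했었던 게임들중 적의수가 가장 많았던 단계에서 무적권 사용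
--             n-=hq.heappop(heapq)
--             k-=1
--             answer += 1
--
--     return answer
-- ===== SOURCE B (Python) =====
-- import heapq
--
-- def solution(n, k, enemy):
--     if n < 0:
--         return 0
--     answer = 0
--     skipped = []  # min-heap of the (at most k) waves we pass with invincibility
--     for e in enemy:
--         heapq.heappush(skipped, e)
--         if len(skipped) > k:
--             n -= heapq.heappop(skipped)  # fight the smallest candidate wave
--             if n < 0:
--                 break
--         answer += 1
--     return answer
-- ===== Notes on version B (the rewrite author's own statement) =====
-- stated objective: alternative
-- what changed: A subtracts every wave and lazily refunds the largest past wave from a max-heap when the budget goes negative; B never spends on skipped waves, maintaining a min-heap of at most k skipped waves and paying only for the smallest overflowing wave each round.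
-- outside the precondition, e.g. on solution(6, 1, [9, -3, 13]): A returns 2, B returns 3; on solution(2, 1, [5, -3, -3, 10, 0, 12, -10]): A returns 3, B returns 5
import Mathlib
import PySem

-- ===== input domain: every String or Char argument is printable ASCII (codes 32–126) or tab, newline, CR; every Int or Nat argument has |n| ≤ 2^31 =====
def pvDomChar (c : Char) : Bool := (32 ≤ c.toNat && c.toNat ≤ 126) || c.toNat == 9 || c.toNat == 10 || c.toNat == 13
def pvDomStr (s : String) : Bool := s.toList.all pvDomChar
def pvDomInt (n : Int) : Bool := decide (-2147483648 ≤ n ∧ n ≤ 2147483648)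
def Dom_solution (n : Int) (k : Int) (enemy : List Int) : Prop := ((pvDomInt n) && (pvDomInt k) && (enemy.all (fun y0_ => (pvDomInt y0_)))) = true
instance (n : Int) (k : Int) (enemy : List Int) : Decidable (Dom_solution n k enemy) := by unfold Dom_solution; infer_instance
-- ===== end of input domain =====

-- B replaces A's lazy max-heap refunding with an eager min-heap of at most k skipped waves (alternative algorithm).

-- ===== PORT A =====
-- Python's heapq is ported as a sorted-ascending list: heappush = ordered insert, heappop = take
-- the head (the minimum); exact on every value heappop returns. A pushes negated wave sizes, so
-- the heap head is minus the maximum pushed wave.  The heap is never empty when A pops (a push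
-- directly precedes), so headD's default is never consulted.
def solLoopA (n k answer : Int) (heap : List Int) : List Int → Int
  | [] => answer
  | e :: rest =>
    if 0 ≤ n then
      let n1 := n - e
      let heap1 := List.orderedInsert (· ≤ ·) (-e) heap
      if 0 ≤ n1 then solLoopA n1 k (answer + 1) heap1 rest
      else if 0 < k then solLoopA (n1 - heap1.headD 0) (k - 1) (answer + 1) heap1.tail rest
      else solLoopA n1 k answer heap1 rest
    else answer

def solution (n : Int) (k : Int) (enemy : List Int) : Int :=
  if n > enemy.sum then enemy.length
  else solLoopA n k 0 [] enemy

-- ===== PORT B =====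
-- B's min-heap of skipped waves, same heapq-as-sorted-list port: push = ordered insert, pop = head.
def solLoopB (n k answer : Int) (skipped : List Int) : List Int → Int
  | [] => answer
  | e :: rest =>
    let sk1 := List.orderedInsert (· ≤ ·) e skipped
    if (sk1.length : Int) > k then
      let n1 := n - sk1.headD 0
      if n1 < 0 then answer
      else solLoopB n1 k (answer + 1) sk1.tail rest
    else solLoopB n k (answer + 1) sk1 rest

def solution_alt (n : Int) (k : Int) (enemy : List Int) : Int :=
  if n < 0 then 0
  else solLoopB n k 0 [] enemy

-- ===== PRECONDITION & SPEC =====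
-- Pre_ excludes negative wave sizes: waves are enemy head-counts, so negative entries lie outside
-- the game's natural domain; there A's lazy max-refund and B's top-k bookkeeping legitimately
-- diverge (A still returns a value on such inputs — see the cited examples in the claim).
def Pre_solution (n : Int) (k : Int) (enemy : List Int) : Prop := ∀ e ∈ enemy, 0 ≤ e
instance (n : Int) (k : Int) (enemy : List Int) : Decidable (Pre_solution n k enemy) := by unfold Pre_solution; infer_instance

def pvWitness_solution : Int × Int × List Int := (10, 1, [4, 2, 4, 8, 3])

def Spec_solution (n : Int) (k : Int) (enemy : List Int) (out : Int) : Prop := out = solution_alt n k enemy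
instance (n : Int) (k : Int) (enemy : List Int) (out : Int) : Decidable (Spec_solution n k enemy out) := by unfold Spec_solution; infer_instance

-- ===== CLAIM (what is proved, stated in full; the proofs are below) =====
def Claim_equal_solution : Prop := ∀ (n : Int) (k : Int) (enemy : List Int), Dom_solution n k enemy → Pre_solution n k enemy → Spec_solution n k enemy (solution n k enemy)

-- ===== LEMMAS AND PROOFS =====

-- Proof device: insertion into a descending-sorted list, and the descending insertion sort.
def dIns (e : Int) : List Int → List Int
  | [] => [e]
  | x :: xs => if x ≤ e then e :: x :: xs else x :: dIns e xs

def dSort (l : List Int) : List Int := l.foldl (fun acc e => dIns e acc) []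

-- sum of the k largest elements of P
def topSum (k : Int) (P : List Int) : Int := ((dSort P).take k.toNat).sum

-- the common characterization: number of survived rounds, counting while the prefix deficit
-- (prefix sum minus its k largest waves) stays within the budget
def cnt (n0 k : Int) : List Int → List Int → Int
  | _, [] => 0
  | P, e :: rest =>
    if 0 ≤ n0 - (P ++ [e]).sum + topSum k (P ++ [e]) then 1 + cnt n0 k (P ++ [e]) rest else 0

lemma dIns_perm (e : Int) (l : List Int) : (dIns e l).Perm (e :: l) := by
  induction l with
  | nil => simp [dIns]
  | cons x xs ih =>
    by_cases h : x ≤ e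
    · simp [dIns, h]
    · simpa [dIns, h] using (ih.cons x).trans (List.Perm.swap e x xs)

lemma mem_dIns {a e : Int} {l : List Int} : a ∈ dIns e l ↔ a = e ∨ a ∈ l := by
  rw [(dIns_perm e l).mem_iff]; simp

lemma dIns_pairwise {e : Int} {l : List Int} (h : l.Pairwise (· ≥ ·)) :
    (dIns e l).Pairwise (· ≥ ·) := by
  induction l with
  | nil => simp [dIns]
  | cons x xs ih =>
    rcases List.pairwise_cons.mp h with ⟨hx, hxs⟩
    by_cases hxe : x ≤ e
    · simp only [dIns, if_pos hxe]
      refine List.pairwise_cons.mpr ⟨?_, h⟩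
      intro y hy
      rcases List.mem_cons.mp hy with rfl | hy
      · exact hxe
      · exact le_trans (hx y hy) hxe
    · simp only [dIns, if_neg hxe]
      refine List.pairwise_cons.mpr ⟨?_, ih hxs⟩
      intro y hy
      rcases mem_dIns.mp hy with rfl | hy
      · exact le_of_lt (lt_of_not_ge hxe)
      · exact hx y hy

lemma dSort_aux_perm : ∀ (l acc : List Int), (l.foldl (fun a e => dIns e a) acc).Perm (acc ++ l) := by
  intro l
  induction l with
  | nil => intro acc; simp
  | cons e l ih =>
    intro acc
    refine (ih (dIns e acc)).trans ?_
    refine (((dIns_perm e acc).append_right l).trans ?_)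
    exact List.perm_middle.symm

lemma dSort_perm (l : List Int) : (dSort l).Perm l := by
  simpa using dSort_aux_perm l []

lemma dSort_aux_pairwise : ∀ (l acc : List Int), acc.Pairwise (· ≥ ·) →
    (l.foldl (fun a e => dIns e a) acc).Pairwise (· ≥ ·) := by
  intro l
  induction l with
  | nil => intro acc h; simpa using h
  | cons e l ih => intro acc h; exact ih (dIns e acc) (dIns_pairwise h)

lemma dSort_pairwise (l : List Int) : (dSort l).Pairwise (· ≥ ·) :=
  dSort_aux_pairwise l [] (by simp)

lemma dSort_length (l : List Int) : (dSort l).length = l.length :=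
  (dSort_perm l).length_eq

lemma dSort_append (P : List Int) (e : Int) : dSort (P ++ [e]) = dIns e (dSort P) := by
  simp [dSort]

-- insertion strictly below the first u elements leaves them untouched
lemma dIns_take_drop_of_lt (e : Int) : ∀ (u : Nat) (l : List Int), u ≤ l.length →
    (∀ x ∈ l.take u, e < x) →
    (dIns e l).take u = l.take u ∧ (dIns e l).drop u = dIns e (l.drop u) := by
  intro u
  induction u with
  | zero => intro l _ _; simp
  | succ u ih =>
    intro l hu h
    cases l with
    | nil => simp at hu
    | cons x xs =>
      have hex : e < x := h x (by simp)
      have hxe : ¬ x ≤ e := not_le.mpr hex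
      have ihr := ih xs (by simpa using hu) (fun y hy => h y (by simp [hy]))
      simp only [dIns, if_neg hxe, List.take_succ_cons, List.drop_succ_cons]
      exact ⟨by rw [ihr.1], ihr.2⟩

-- insertion inside the first u elements: the first u+1 slots are e plus the old first u
lemma dIns_take_drop_of_le (e : Int) : ∀ (u : Nat) (l : List Int),
    (∃ x ∈ l.take u, x ≤ e) →
    ((dIns e l).take (u + 1)).Perm (e :: l.take u) ∧ (dIns e l).drop (u + 1) = l.drop u := by
  intro u
  induction u with
  | zero => rintro l ⟨x, hx, -⟩; simp at hx
  | succ u ih =>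
    rintro l ⟨x0, hx0, hx0e⟩
    cases l with
    | nil => simp at hx0
    | cons x xs =>
      by_cases hxe : x ≤ e
      · simp [dIns, if_pos hxe]
      · have hx0' : x0 ∈ xs.take u := by
          rcases List.mem_cons.mp (by simpa using hx0) with rfl | hmem
          · exact absurd hx0e hxe
          · exact hmem
        have ihr := ih xs ⟨x0, hx0', hx0e⟩
        simp only [dIns, if_neg hxe, List.take_succ_cons, List.drop_succ_cons]
        constructor
        · exact ((ihr.1.cons x).trans (List.Perm.swap e x _))
        · exact ihr.2

lemma perm_cancel_left {a b c : List Int} (h : (a ++ b).Perm (a ++ c)) : b.Perm c := by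
  induction a with
  | nil => simpa using h
  | cons x a ih => exact ih ((h : (x :: (a ++ b)).Perm (x :: (a ++ c))).cons_inv)

lemma sum_nonneg_int {l : List Int} (h : ∀ x ∈ l, 0 ≤ x) : 0 ≤ l.sum := by
  induction l with
  | nil => simp
  | cons x xs ih =>
    simp only [List.sum_cons]
    have := h x (by simp)
    have := ih (fun y hy => h y (by simp [hy]))
    omega

lemma sum_take_mono {l : List Int} (h : ∀ x ∈ l, 0 ≤ x) {a b : Nat} (hab : a ≤ b) :
    (l.take a).sum ≤ (l.take b).sum := by
  have hb : b = a + (b - a) := by omega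
  rw [hb, List.take_add, List.sum_append]
  have : 0 ≤ ((l.drop a).take (b - a)).sum := by
    refine sum_nonneg_int (fun x hx => h x ?_)
    exact List.mem_of_mem_drop (List.mem_of_mem_take hx)
  omega

lemma take_succ_getElem {l : List Int} {u : Nat} (hu : u < l.length) :
    l.take (u + 1) = l.take u ++ [l[u]] := by
  rw [List.take_succ, List.getElem?_eq_getElem hu]
  rfl

-- in a descending list, the (u+1)-st element is a lower bound of the first u+1
lemma pairwise_take_min {l : List Int} (hl : l.Pairwise (· ≥ ·)) {u : Nat} (hu : u < l.length) :
    ∀ y ∈ l.take (u + 1), l[u] ≤ y := by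
  intro y hy
  obtain ⟨i, hi, hiy⟩ := List.getElem_of_mem hy
  have hi' : i < u + 1 ∧ i < l.length := by
    simp only [List.length_take, Nat.lt_min] at hi; exact hi
  have hyl : y = l[i]'hi'.2 := by rw [← hiy]; exact List.getElem_take
  rcases Nat.lt_or_ge i u with hlt | hge
  · rw [hyl]; exact List.pairwise_iff_getElem.mp hl i u hi'.2 hu hlt
  · have hieq : i = u := by omega
    subst hieq; rw [hyl]

lemma pairwise_ge_head {x : Int} {xs : List Int} (h : (x :: xs).Pairwise (· ≥ ·)) :
    ∀ y ∈ x :: xs, y ≤ x := by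
  intro y hy
  rcases List.mem_cons.mp hy with rfl | hy
  · exact le_refl y
  · exact (List.pairwise_cons.mp h).1 y hy

lemma pairwise_le_head {x : Int} {xs : List Int} (h : (x :: xs).Pairwise (· ≤ ·)) :
    ∀ y ∈ x :: xs, x ≤ y := by
  intro y hy
  rcases List.mem_cons.mp hy with rfl | hy
  · exact le_refl y
  · exact (List.pairwise_cons.mp h).1 y hy

lemma orderedInsert_map_neg (e : Int) (l : List Int) :
    List.orderedInsert (· ≤ ·) (-e) (l.map (fun x => -x)) = (dIns e l).map (fun x => -x) := by
  induction l with
  | nil => simp [List.orderedInsert, dIns]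
  | cons x xs ih =>
    by_cases h : x ≤ e
    · have : (-e ≤ -x) := by omega
      simp [List.orderedInsert, dIns, h, this]
    · have : ¬ (-e ≤ -x) := by omega
      simp [List.orderedInsert, dIns, h, this, ih]

lemma loopA_of_neg {n k a : Int} {h : List Int} {rest : List Int} (hn : n < 0) :
    solLoopA n k a h rest = a := by
  cases rest with
  | nil => rfl
  | cons e r => simp [solLoopA, not_le.mpr hn]

lemma cnt_full (n0 k : Int) : ∀ (rest P : List Int), (∀ x ∈ P, 0 ≤ x) → (∀ x ∈ rest, 0 ≤ x) →
    P.sum + rest.sum < n0 → cnt n0 k P rest = rest.length := by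
  intro rest
  induction rest with
  | nil => intro P _ _ _; simp [cnt]
  | cons e r ih =>
    intro P hP hr hlt
    have he : 0 ≤ e := hr e (by simp)
    have hr' : ∀ x ∈ r, 0 ≤ x := fun x hx => hr x (by simp [hx])
    have hrs : 0 ≤ r.sum := sum_nonneg_int hr'
    have hP' : ∀ x ∈ P ++ [e], 0 ≤ x := by
      intro x hx; rcases List.mem_append.mp hx with hx | hx
      · exact hP x hx
      · simp at hx; omega
    have htop : 0 ≤ topSum k (P ++ [e]) := by
      refine sum_nonneg_int (fun x hx => ?_)
      exact hP' x ((dSort_perm (P ++ [e])).mem_iff.mp (List.mem_of_mem_take hx))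
    have hsum : (P ++ [e]).sum = P.sum + e := by simp
    have hcond : 0 ≤ n0 - (P ++ [e]).sum + topSum k (P ++ [e]) := by
      simp only [List.sum_cons] at hlt; omega
    rw [cnt, if_pos hcond, ih (P ++ [e]) hP' hr' (by simp only [List.sum_cons] at hlt ⊢; omega)]
    simp; omega

-- A's loop invariant: R is the multiset of refunded (invincibility) waves — always the
-- R.length largest waves of the processed prefix P — hv the still-heaped waves, and
-- n = n0 - sum P + sum R, with n below every refunded wave and R dominating hv.
lemma loopA_eq_cnt (n0 k : Int) :
    ∀ (rest P R hv : List Int) (nA ans : Int),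
    (∀ x ∈ P, 0 ≤ x) → (∀ x ∈ rest, 0 ≤ x) →
    hv.Pairwise (· ≥ ·) →
    P.Perm (R ++ hv) →
    R.Perm ((dSort P).take R.length) →
    R.length ≤ k.toNat →
    nA = n0 - P.sum + R.sum →
    0 ≤ nA →
    (∀ r ∈ R, nA < r) →
    (∀ r ∈ R, ∀ h ∈ hv, h ≤ r) →
    solLoopA nA (k - R.length) ans (hv.map (fun x => -x)) rest = ans + cnt n0 k P rest := by
  intro rest
  induction rest with
  | nil => intros; simp [solLoopA, cnt]
  | cons e rest ih =>
    intro P R hv nA ans hP hr hhv hPerm hRtop hRk hnA hnn hmin hdom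
    have he : 0 ≤ e := hr e (by simp)
    have hr' : ∀ x ∈ rest, 0 ≤ x := fun x hx => hr x (by simp [hx])
    have hP' : ∀ x ∈ P ++ [e], 0 ≤ x := by
      intro x hx; rcases List.mem_append.mp hx with hx | hx
      · exact hP x hx
      · simp at hx; omega
    have hl_pw := dSort_pairwise P
    have hl'_pw := dSort_pairwise (P ++ [e])
    have hl_len : (dSort P).length = P.length := dSort_length P
    have hl'_len : (dSort (P ++ [e])).length = P.length + 1 := by
      rw [dSort_length]; simp
    have hulen : R.length ≤ P.length := by
      have h1 := hRtop.length_eq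
      simp only [List.length_take, hl_len] at h1; omega
    have hl'_nonneg : ∀ x ∈ dSort (P ++ [e]), 0 ≤ x :=
      fun x hx => hP' x ((dSort_perm (P ++ [e])).mem_iff.mp hx)
    have hmemR : ∀ x, x ∈ (dSort P).take R.length → x ∈ R :=
      fun x hx => hRtop.symm.mem_iff.mp hx
    have hsumR : R.sum = ((dSort P).take R.length).sum := hRtop.sum_eq
    have hPerm' : (P ++ [e]).Perm (R ++ dIns e hv) := by
      refine (hPerm.append_right [e]).trans ?_
      rw [List.append_assoc]
      exact List.Perm.append_left R ((List.perm_append_singleton e hv).trans (dIns_perm e hv).symm)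
    have hcnt : cnt n0 k P (e :: rest)
        = if 0 ≤ n0 - (P ++ [e]).sum + ((dSort (P ++ [e])).take k.toNat).sum
          then 1 + cnt n0 k (P ++ [e]) rest else 0 := by
      simp [cnt, topSum]
    simp only [solLoopA, if_pos hnn, orderedInsert_map_neg]
    by_cases hb1 : 0 ≤ nA - e
    · -- survive without refund
      have hQ : ∀ x ∈ (dSort P).take R.length, e < x :=
        fun x hx => lt_of_le_of_lt (by omega) (hmin x (hmemR x hx))
      obtain ⟨htake, hdrop⟩ := dIns_take_drop_of_lt e R.length (dSort P) (by omega) hQ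
      have hRtop' : R.Perm ((dSort (P ++ [e])).take R.length) := by
        rw [dSort_append, htake]; exact hRtop
      have hstep := ih (P ++ [e]) R (dIns e hv) (nA - e) (ans + 1) hP' hr'
        (dIns_pairwise hhv) hPerm' hRtop' hRk
        (by simp; omega) hb1
        (fun r hrR => by have := hmin r hrR; omega)
        (by
          intro r hrR h hh
          rcases mem_dIns.mp hh with rfl | hh
          · have := hmin r hrR; omega
          · exact hdom r hrR h hh)
      rw [if_pos hb1, hstep, hcnt]
      have hge : ((dSort (P ++ [e])).take R.length).sum
          ≤ ((dSort (P ++ [e])).take k.toNat).sum := sum_take_mono hl'_nonneg hRk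
      have heq : ((dSort (P ++ [e])).take R.length).sum = R.sum := by
        rw [dSort_append, htake, ← hsumR]
      rw [if_pos (by simp; omega)]
      ring
    · rw [if_neg hb1]
      by_cases hb2 : 0 < k - (R.length : Int)
      · -- deficit: use an invincibility refund
        rw [if_pos hb2]
        by_cases hQ : ∀ x ∈ (dSort P).take R.length, e < x
        · -- the incoming wave sits below the refunded ones
          obtain ⟨htake, hdrop⟩ := dIns_take_drop_of_lt e R.length (dSort P) (by omega) hQ
          obtain ⟨m, t, hshape⟩ : ∃ m t, dIns e hv = m :: t := by
            cases hmt : dIns e hv with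
            | nil =>
              have hlen := (dIns_perm e hv).length_eq
              rw [hmt] at hlen; simp at hlen
            | cons m t => exact ⟨m, t, rfl⟩
          have hv1_pw : (m :: t).Pairwise (· ≥ ·) := hshape ▸ dIns_pairwise hhv
          have hm_head : ∀ y ∈ m :: t, y ≤ m := pairwise_ge_head hv1_pw
          have he_mem : e ∈ m :: t := hshape ▸ mem_dIns.mpr (Or.inl rfl)
          have he_m : e ≤ m := hm_head e he_mem
          have hm_mem : m = e ∨ m ∈ hv := mem_dIns.mp (hshape ▸ (by simp : m ∈ m :: t))
          -- identify m with the (u+1)-st element of the new sorted prefix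
          have hul : R.length < (dSort (P ++ [e])).length := by omega
          have hRl' : R.Perm ((dSort (P ++ [e])).take R.length) := by
            rw [dSort_append, htake]; exact hRtop
          have hPerm2 : (P ++ [e]).Perm (R ++ (m :: t)) := by
            rw [← hshape]; exact hPerm'
          have hdropPerm : ((dSort (P ++ [e])).drop R.length).Perm (m :: t) := by
            refine perm_cancel_left (a := (dSort (P ++ [e])).take R.length) ?_
            rw [List.take_append_drop]
            exact ((dSort_perm (P ++ [e])).trans hPerm2).trans (hRl'.append_right _)
          have hgetcons : (dSort (P ++ [e])).drop R.length
              = (dSort (P ++ [e]))[R.length] :: (dSort (P ++ [e])).drop (R.length + 1) :=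
            List.drop_eq_getElem_cons hul
          have hd_pw : ((dSort (P ++ [e])).drop R.length).Pairwise (· ≥ ·) :=
            hl'_pw.sublist (List.drop_sublist _ _)
          have hd_head : ∀ y ∈ (dSort (P ++ [e])).drop R.length,
              y ≤ (dSort (P ++ [e]))[R.length] := by
            rw [hgetcons] at hd_pw ⊢; exact pairwise_ge_head hd_pw
          have hmemdrop : (dSort (P ++ [e]))[R.length] ∈ (dSort (P ++ [e])).drop R.length := by
            have h0 : 0 < ((dSort (P ++ [e])).drop R.length).length := by
              rw [List.length_drop]; omega
            have hmem0 := List.getElem_mem h0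
            simpa [List.getElem_drop] using hmem0
          have hmu : m = (dSort (P ++ [e]))[R.length] :=
            le_antisymm (hd_head m (hdropPerm.symm.mem_iff.mp (by simp)))
              (hm_head _ (hdropPerm.mem_iff.mp hmemdrop))
          have htksucc : (dSort (P ++ [e])).take (R.length + 1)
              = (dSort (P ++ [e])).take R.length ++ [(dSort (P ++ [e]))[R.length]] :=
            take_succ_getElem hul
          have hRtop' : (R ++ [m]).Perm ((dSort (P ++ [e])).take (R.length + 1)) := by
            rw [htksucc, ← hmu, dSort_append, htake]
            exact hRtop.append_right [m]
          have hsum_tk : ((dSort (P ++ [e])).take (R.length + 1)).sum = R.sum + m := by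
            rw [← hRtop'.sum_eq]; simp
          have hnn' : 0 ≤ nA - e + m := by omega
          have hstep := ih (P ++ [e]) (R ++ [m]) t (nA - e + m) (ans + 1) hP' hr'
            (List.pairwise_cons.mp hv1_pw).2
            (by simpa using hPerm2)
            (by simpa using hRtop')
            (by simp; omega)
            (by simp; omega) hnn'
            (by
              intro r hrR
              rcases List.mem_append.mp hrR with hrR | hrm
              · rcases hm_mem with rfl | hmv
                · have := hmin r hrR; omega
                · have := hdom r hrR m hmv; omega
              · simp at hrm; subst hrm; omega)
            (by
              intro r hrR h hh
              have hh1 : h ∈ m :: t := by simp [hh]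
              rcases List.mem_append.mp hrR with hrR | hrm
              · rcases mem_dIns.mp (hshape ▸ hh1) with rfl | hhv'
                · exact le_of_lt (hQ r (hRtop.mem_iff.mp hrR))
                · exact hdom r hrR h hhv'
              · simp at hrm; subst hrm; exact hm_head h hh1)
          rw [hshape]
          simp only [List.map_cons, List.headD_cons, List.tail_cons]
          have harg1 : nA - e - (-m) = nA - e + m := by ring
          have harg2 : k - (R.length : Int) - 1 = k - ((R ++ [m]).length : Int) := by
            simp; ring
          rw [harg1, harg2, hstep, hcnt]
          have hge : ((dSort (P ++ [e])).take (R.length + 1)).sum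
              ≤ ((dSort (P ++ [e])).take k.toNat).sum :=
            sum_take_mono hl'_nonneg (by omega)
          rw [hsum_tk] at hge
          rw [if_pos (by simp; omega)]
          ring
        · -- the incoming wave is at least one refunded wave: it is refunded back at once
          push_neg at hQ
          obtain ⟨x0, hx0, hx0e⟩ := hQ
          have hx0e' : x0 ≤ e := hx0e
          have hx0R : x0 ∈ R := hmemR x0 hx0
          have hhv_le : ∀ h ∈ hv, h ≤ e := fun h hh => le_trans (hdom x0 hx0R h hh) hx0e'
          have hv1eq : dIns e hv = e :: hv := by
            cases hv with
            | nil => rfl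
            | cons h tl => simp [dIns, hhv_le h (by simp)]
          obtain ⟨htake1, hdrop1⟩ := dIns_take_drop_of_le e R.length (dSort P) ⟨x0, hx0, hx0e'⟩
          have hRtop' : (R ++ [e]).Perm ((dSort (P ++ [e])).take (R.length + 1)) := by
            rw [dSort_append]
            exact ((List.perm_append_singleton e R).trans (hRtop.cons e)).trans htake1.symm
          have hstep := ih (P ++ [e]) (R ++ [e]) hv nA (ans + 1) hP' hr' hhv
            (by
              have hp := hPerm'
              rw [hv1eq] at hp
              simpa using hp)
            (by simpa using hRtop')
            (by simp; omega)
            (by simp; omega) hnn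
            (by
              intro r hrR
              rcases List.mem_append.mp hrR with hrR | hrm
              · exact hmin r hrR
              · simp at hrm; subst hrm; omega)
            (by
              intro r hrR h hh
              rcases List.mem_append.mp hrR with hrR | hrm
              · exact hdom r hrR h hh
              · simp at hrm; subst hrm; exact hhv_le h hh)
          rw [hv1eq]
          simp only [List.map_cons, List.headD_cons, List.tail_cons]
          have harg1 : nA - e - (-e) = nA := by ring
          have harg2 : k - (R.length : Int) - 1 = k - ((R ++ [e]).length : Int) := by
            simp; ring
          rw [harg1, harg2, hstep, hcnt]
          have hsum_tk : ((dSort (P ++ [e])).take (R.length + 1)).sum = R.sum + e := by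
            rw [← hRtop'.sum_eq]; simp
          have hge : ((dSort (P ++ [e])).take (R.length + 1)).sum
              ≤ ((dSort (P ++ [e])).take k.toNat).sum :=
            sum_take_mono hl'_nonneg (by omega)
          rw [if_pos (by simp; omega)]
          ring
      · -- deficit with no invincibility left: the game ends here
        rw [if_neg hb2, loopA_of_neg (by omega)]
        have huk : R.length = k.toNat := by omega
        have hcond : ¬ (0 ≤ n0 - (P ++ [e]).sum + ((dSort (P ++ [e])).take k.toNat).sum) := by
          rw [← huk]
          by_cases hQ : ∀ x ∈ (dSort P).take R.length, e < x
          · obtain ⟨htake, -⟩ := dIns_take_drop_of_lt e R.length (dSort P) (by omega) hQ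
            rw [dSort_append, htake]
            simp; omega
          · push_neg at hQ
            obtain ⟨x0, hx0, hx0e⟩ := hQ
            have hx0e' : x0 ≤ e := hx0e
            obtain ⟨htake1, -⟩ := dIns_take_drop_of_le e R.length (dSort P) ⟨x0, hx0, hx0e'⟩
            have hul : R.length < (dSort (P ++ [e])).length := by omega
            have htksucc := take_succ_getElem hul
            have hsum1 : ((dSort (P ++ [e])).take (R.length + 1)).sum
                = e + ((dSort P).take R.length).sum := by
              rw [dSort_append, htake1.sum_eq]; simp
            have hsum2 : ((dSort (P ++ [e])).take R.length).sum
                = e + ((dSort P).take R.length).sum - (dSort (P ++ [e]))[R.length] := by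
              have := congrArg List.sum htksucc
              simp only [List.sum_append, List.sum_cons, List.sum_nil] at this
              omega
            have hmem_u : (dSort (P ++ [e]))[R.length] = e
                ∨ (dSort (P ++ [e]))[R.length] ∈ (dSort P).take R.length := by
              have h0 : R.length < ((dSort (P ++ [e])).take (R.length + 1)).length := by
                rw [List.length_take]; omega
              have hmem0 := List.getElem_mem h0
              rw [List.getElem_take] at hmem0
              have hres := (dSort_append P e ▸ htake1).mem_iff.mp hmem0
              simpa using hres
            rw [hsum2]
            rcases hmem_u with hc | hc
            · rw [hc]; simp; omega
            · have := hmin _ (hmemR _ hc); simp; omega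
        rw [hcnt, if_neg hcond]
        simp

lemma orderedInsert_pairwise_le {e : Int} {l : List Int} (h : l.Pairwise (· ≤ ·)) :
    (List.orderedInsert (· ≤ ·) e l).Pairwise (· ≤ ·) := by
  induction l with
  | nil => simp
  | cons x xs ih =>
    rcases List.pairwise_cons.mp h with ⟨hx, hxs⟩
    by_cases hxe : e ≤ x
    · simp only [List.orderedInsert, if_pos hxe]
      refine List.pairwise_cons.mpr ⟨?_, h⟩
      intro y hy
      rcases List.mem_cons.mp hy with rfl | hy
      · exact hxe
      · exact le_trans hxe (hx y hy)
    · simp only [List.orderedInsert, if_neg hxe]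
      refine List.pairwise_cons.mpr ⟨?_, ih hxs⟩
      intro y hy
      have hy' := (List.perm_orderedInsert _ e xs).mem_iff.mp hy
      rcases List.mem_cons.mp hy' with rfl | hy'
      · exact le_of_lt (lt_of_not_ge hxe)
      · exact hx y hy'

-- B's loop invariant: skipped is exactly the multiset of the min(|P|, k) largest waves of the
-- processed prefix P, kept ascending, and n = n0 - sum P + sum skipped.
lemma loopB_eq_cnt (n0 k : Int) :
    ∀ (rest P sk : List Int) (nB ans : Int),
    (∀ x ∈ P, 0 ≤ x) → (∀ x ∈ rest, 0 ≤ x) →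
    sk.Pairwise (· ≤ ·) →
    sk.Perm ((dSort P).take sk.length) →
    sk.length = min P.length k.toNat →
    nB = n0 - P.sum + sk.sum →
    0 ≤ nB →
    solLoopB nB k ans sk rest = ans + cnt n0 k P rest := by
  intro rest
  induction rest with
  | nil => intros; simp [solLoopB, cnt]
  | cons e rest ih =>
    intro P sk nB ans hP hr hsk hsktop hsklen hnB hnn
    have he : 0 ≤ e := hr e (by simp)
    have hr' : ∀ x ∈ rest, 0 ≤ x := fun x hx => hr x (by simp [hx])
    have hP' : ∀ x ∈ P ++ [e], 0 ≤ x := by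
      intro x hx; rcases List.mem_append.mp hx with hx | hx
      · exact hP x hx
      · simp at hx; omega
    have hl_pw := dSort_pairwise P
    have hl'_pw := dSort_pairwise (P ++ [e])
    have hl_len : (dSort P).length = P.length := dSort_length P
    have hl'_len : (dSort (P ++ [e])).length = P.length + 1 := by
      rw [dSort_length]; simp
    have hl'_nonneg : ∀ x ∈ dSort (P ++ [e]), 0 ≤ x :=
      fun x hx => hP' x ((dSort_perm (P ++ [e])).mem_iff.mp hx)
    have hsk1perm : (List.orderedInsert (· ≤ ·) e sk).Perm (e :: sk) :=
      List.perm_orderedInsert _ e sk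
    have hsk1len : (List.orderedInsert (· ≤ ·) e sk).length = sk.length + 1 := by
      rw [hsk1perm.length_eq]; simp
    have hsk1pw : (List.orderedInsert (· ≤ ·) e sk).Pairwise (· ≤ ·) :=
      orderedInsert_pairwise_le hsk
    have hsumsk : sk.sum = ((dSort P).take sk.length).sum := hsktop.sum_eq
    have hmlen : sk.length ≤ P.length := by omega
    have hcnt : cnt n0 k P (e :: rest)
        = if 0 ≤ n0 - (P ++ [e]).sum + ((dSort (P ++ [e])).take k.toNat).sum
          then 1 + cnt n0 k (P ++ [e]) rest else 0 := by
      simp [cnt, topSum]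
    simp only [solLoopB]
    by_cases hTrim : ((List.orderedInsert (· ≤ ·) e sk).length : Int) > k
    · rw [if_pos hTrim]
      have hmk : sk.length = k.toNat := by
        rw [hsk1len] at hTrim; push_cast at hTrim; omega
      obtain ⟨c, t, hshape⟩ : ∃ c t, List.orderedInsert (· ≤ ·) e sk = c :: t := by
        cases hmt : List.orderedInsert (· ≤ ·) e sk with
        | nil => rw [hmt] at hsk1len; simp at hsk1len
        | cons c t => exact ⟨c, t, rfl⟩
      have hct_pw : (c :: t).Pairwise (· ≤ ·) := hshape ▸ hsk1pw
      have hc_min : ∀ y ∈ c :: t, c ≤ y := pairwise_le_head hct_pw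
      have hct_perm : (c :: t).Perm (e :: sk) := hshape ▸ hsk1perm
      have htlen : t.length = sk.length := by
        have := hct_perm.length_eq; simp at this; omega
      have hcmem : c = e ∨ c ∈ sk := by
        have : c ∈ e :: sk := hct_perm.mem_iff.mp (by simp)
        simpa using this
      rw [hshape]
      simp only [List.headD_cons, List.tail_cons]
      by_cases hQ : ∀ x ∈ (dSort P).take sk.length, e < x
      · -- new wave below the kept top-k: it is fought at once
        obtain ⟨htake, hdrop⟩ := dIns_take_drop_of_lt e sk.length (dSort P) (by omega) hQ
        have hce : c = e := by
          rcases hcmem with rfl | hcsk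
          · rfl
          · have : e < c := hQ c (hsktop.mem_iff.mp hcsk)
            have : c ≤ e := hc_min e (hct_perm.symm.mem_iff.mp (by simp))
            omega
        rw [hce]
        have htsk : t.Perm sk := by
          rw [hce] at hct_perm; exact hct_perm.cons_inv
        have hval : ((dSort (P ++ [e])).take k.toNat).sum = sk.sum := by
          rw [← hmk, dSort_append, htake, hsumsk]
        by_cases hbrk : nB - e < 0
        · rw [if_pos hbrk, hcnt, if_neg (by simp; omega)]
          simp
        · rw [if_neg hbrk]
          have hstep := ih (P ++ [e]) t (nB - e) (ans + 1) hP' hr'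
            (List.pairwise_cons.mp hct_pw).2
            (by
              rw [htlen, dSort_append, htake]
              exact htsk.trans hsktop)
            (by rw [htlen]; simp; omega)
            (by rw [htsk.sum_eq]; simp; omega)
            (by omega)
          rw [hstep, hcnt, if_pos (by simp; omega)]
          ring
      · -- new wave enters the kept top-k; the displaced minimum is fought
        push_neg at hQ
        obtain ⟨x0, hx0, hx0e⟩ := hQ
        obtain ⟨htake1, hdrop1⟩ := dIns_take_drop_of_le e sk.length (dSort P) ⟨x0, hx0, hx0e⟩
        have hul : sk.length < (dSort (P ++ [e])).length := by omega
        have htksucc := take_succ_getElem hul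
        have htk1perm : ((dSort (P ++ [e])).take (sk.length + 1)).Perm (e :: sk) := by
          rw [dSort_append]
          exact htake1.trans (hsktop.cons e).symm
      -- c is the minimum of the new top-(k+1), i.e. the (k+1)-st sorted element
        have hmem_tk : (dSort (P ++ [e]))[sk.length] ∈ (dSort (P ++ [e])).take (sk.length + 1) := by
          have h0 : sk.length < ((dSort (P ++ [e])).take (sk.length + 1)).length := by
            rw [List.length_take]; omega
          have hmem0 := List.getElem_mem h0
          rw [List.getElem_take] at hmem0
          exact hmem0
        have hcu : c = (dSort (P ++ [e]))[sk.length] := by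
          refine le_antisymm ?_ ?_
          · exact hc_min _ (hct_perm.symm.mem_iff.mp (htk1perm.mem_iff.mp hmem_tk))
          · refine pairwise_take_min hl'_pw hul c ?_
            exact htk1perm.symm.mem_iff.mp (hct_perm.mem_iff.mp (by simp))
        have hsum1 : ((dSort (P ++ [e])).take (sk.length + 1)).sum = e + sk.sum := by
          rw [htk1perm.sum_eq]; simp
        have hsum2 : ((dSort (P ++ [e])).take sk.length).sum
            = e + sk.sum - (dSort (P ++ [e]))[sk.length] := by
          have := congrArg List.sum htksucc
          simp only [List.sum_append, List.sum_cons, List.sum_nil] at this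
          omega
        have hval : n0 - (P ++ [e]).sum + ((dSort (P ++ [e])).take k.toNat).sum = nB - c := by
          rw [← hmk, hsum2, ← hcu]; simp; omega
        have htperm : t.Perm ((dSort (P ++ [e])).take sk.length) := by
          have h1 : (c :: t).Perm ((dSort (P ++ [e]))[sk.length]
              :: (dSort (P ++ [e])).take sk.length) := by
            refine (hct_perm.trans htk1perm.symm).trans ?_
            rw [htksucc]
            exact List.perm_append_singleton _ _
          rw [← hcu] at h1
          exact h1.cons_inv
        by_cases hbrk : nB - c < 0
        · rw [if_pos hbrk, hcnt, if_neg (by omega)]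
          simp
        · rw [if_neg hbrk]
          have hstep := ih (P ++ [e]) t (nB - c) (ans + 1) hP' hr'
            (List.pairwise_cons.mp hct_pw).2
            (by rw [htlen]; exact htperm)
            (by rw [htlen]; simp; omega)
            (by rw [htperm.sum_eq, hsum2, ← hcu]; simp; omega)
            (by omega)
          rw [hstep, hcnt, if_pos (by omega)]
          ring
    · -- room under k: the wave is skipped for free
      rw [if_neg hTrim]
      have hklim : sk.length + 1 ≤ k.toNat := by
        rw [hsk1len] at hTrim; push_cast at hTrim; omega
      have hmP : sk.length = P.length := by omega
      have hskl : sk.Perm (dSort P) := by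
        have : (dSort P).take sk.length = dSort P :=
          List.take_of_length_le (by omega)
        rw [this] at hsktop; exact hsktop
      have hsk1all : (List.orderedInsert (· ≤ ·) e sk).Perm (dSort (P ++ [e])) := by
        rw [dSort_append]
        exact hsk1perm.trans ((hskl.cons e).trans (dIns_perm e (dSort P)).symm)
      have hstep := ih (P ++ [e]) (List.orderedInsert (· ≤ ·) e sk) nB (ans + 1) hP' hr'
        hsk1pw
        (by
          rw [hsk1len, List.take_of_length_le (by rw [hl'_len]; omega)]
          exact hsk1all)
        (by rw [hsk1len]; simp; omega)
        (by rw [hsk1perm.sum_eq]; simp; omega)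
        hnn
      have hge : ((dSort (P ++ [e])).take (sk.length + 1)).sum
          ≤ ((dSort (P ++ [e])).take k.toNat).sum := sum_take_mono hl'_nonneg hklim
      have hsum1 : ((dSort (P ++ [e])).take (sk.length + 1)).sum = e + sk.sum := by
        rw [List.take_of_length_le (by rw [hl'_len]; omega), hsk1all.symm.sum_eq,
          hsk1perm.sum_eq]
        simp
      rw [hstep, hcnt, if_pos (by simp; omega)]
      ring

-- ===== VERDICT (by name: the statement is the Claim_ definition above) =====
theorem solution_spec : Claim_equal_solution := by
  intro n k enemy _ hpre
  show solution n k enemy = solution_alt n k enemy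
  have hsum : 0 ≤ enemy.sum := sum_nonneg_int hpre
  have hB0 : ∀ hn : 0 ≤ n, solLoopB n k 0 [] enemy = 0 + cnt n k [] enemy := fun hn =>
    loopB_eq_cnt n k enemy [] [] n 0 (by simp) hpre (by simp) (by simp) (by simp)
      (by simp [dSort]) hn
  unfold solution solution_alt
  by_cases hgt : n > enemy.sum
  · rw [if_pos hgt, if_neg (by omega), hB0 (by omega),
      cnt_full n k enemy [] (by simp) hpre (by simpa using hgt)]
    simp
  · rw [if_neg hgt]
    by_cases hneg : n < 0
    · rw [if_pos hneg]
      exact loopA_of_neg hneg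
    · rw [if_neg hneg, hB0 (by omega)]
      have hA := loopA_eq_cnt n k enemy [] [] [] n 0 (by simp) hpre (by simp) (by simp)
        (by simp) (by simp) (by simp [dSort]) (by omega) (by simp) (by simp)
      simpa using hA
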